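-- pv_equiv track=rewrite | github.com/Jasonduanchengwu/DSA | array_solutions.py | magitude_of_ele_sum_and_digit_sum
-- ===== SOURCE A (Python) =====
-- def magitude_of_ele_sum_and_digit_sum(nums: list[int]) -> int:
--     """
--         Descriptions:   Given an positive Int array nums,
--                         return the absolute difference of the elements sum and the digit sums
--         nums:           array of Integers
--         return:         Absolute difference of the elements sum and the digit sums
--     """
--     digit_sum = 0
--     for ele in nums:
--         # only perform list comprehension when the element is more than 10
--         if float(ele)/10>=1.0:
--             digit_sum += sum([int(d) for d in str(ele)])
--         else:
--             digit_sum += ele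
--     return abs(sum(nums) - digit_sum)
-- ===== SOURCE B (Python) =====
-- def _digit_sum(n: int) -> int:
--     s = 0
--     while n:
--         s += n % 10
--         n //= 10
--     return s
--
--
-- def magitude_of_ele_sum_and_digit_sum(nums: list[int]) -> int:
--     # One pass, one running difference: elements below 10 cancel exactly
--     # against their own value in the element sum, so they contribute 0.
--     diff = 0
--     for ele in nums:
--         if ele >= 10:
--             diff += ele - _digit_sum(ele)
--     return abs(diff)
-- ===== Notes on version B (the rewrite author's own statement) =====
-- stated objective: faster
-- what changed: B makes a single pass keeping one running difference and computes each digit sum arithmetically (% 10 // 10) instead of A's separate sum(nums) pass plus per-element str()/int() round-trip and temporary lists.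
import Mathlib
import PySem

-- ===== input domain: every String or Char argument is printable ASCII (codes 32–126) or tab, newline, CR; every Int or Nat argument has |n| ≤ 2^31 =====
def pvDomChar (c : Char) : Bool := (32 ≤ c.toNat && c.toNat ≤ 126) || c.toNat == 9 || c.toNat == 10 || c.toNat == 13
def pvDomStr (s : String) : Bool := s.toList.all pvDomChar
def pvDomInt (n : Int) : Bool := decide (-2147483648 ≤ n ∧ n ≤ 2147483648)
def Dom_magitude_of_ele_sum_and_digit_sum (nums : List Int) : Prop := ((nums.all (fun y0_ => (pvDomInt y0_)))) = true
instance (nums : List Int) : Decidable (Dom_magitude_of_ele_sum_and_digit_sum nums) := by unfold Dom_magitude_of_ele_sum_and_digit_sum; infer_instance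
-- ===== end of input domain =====

-- B folds A's two passes (sum(nums) and the digit-sum loop) into one running difference and
-- computes digit sums arithmetically (% 10, // 10) instead of the str()/int() round-trip.

-- ===== PORT A =====
-- int(d) for a single digit character d (exact on '0'..'9', the only characters str(ele)
-- yields in the branch that uses it, since there ele >= 10)
def pvCharDigit (c : Char) : Int := (c.toNat : Int) - 48

def magitude_of_ele_sum_and_digit_sum (nums : List Int) : Int :=
  let digit_sum := nums.foldl (fun acc ele =>
    -- 'float(ele)/10 >= 1.0' is exactly '10 <= ele' on this domain (|ele| ≤ 2^31 < 2^53, float exact)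
    if 10 ≤ ele then acc + ((PySem.Int.toChars ele).map pvCharDigit).sum
    else acc + ele) 0
  |nums.sum - digit_sum|

-- ===== PORT B =====
-- Source B's _digit_sum: while n: s += n % 10; n //= 10  (called only on ele >= 10, so on Nat)
def pvDigitSum : Nat → Int
  | 0 => 0
  | n+1 => (((n+1) % 10 : Nat) : Int) + pvDigitSum ((n+1)/10)
decreasing_by exact Nat.div_lt_self (Nat.succ_pos n) (by omega)

def magitude_of_ele_sum_and_digit_sum_alt (nums : List Int) : Int :=
  |nums.foldl (fun diff ele =>
    if 10 ≤ ele then diff + ele - pvDigitSum ele.toNat else diff) 0|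

-- ===== PRECONDITION & SPEC =====
def Spec_magitude_of_ele_sum_and_digit_sum (nums : List Int) (out : Int) : Prop := out = magitude_of_ele_sum_and_digit_sum_alt nums
instance (nums : List Int) (out : Int) : Decidable (Spec_magitude_of_ele_sum_and_digit_sum nums out) := by unfold Spec_magitude_of_ele_sum_and_digit_sum; infer_instance

-- ===== CLAIM (what is proved, stated in full; the proofs are below) =====
def Claim_equal_magitude_of_ele_sum_and_digit_sum : Prop := ∀ (nums : List Int), Dom_magitude_of_ele_sum_and_digit_sum nums → Spec_magitude_of_ele_sum_and_digit_sum nums (magitude_of_ele_sum_and_digit_sum nums)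

-- ===== LEMMAS AND PROOFS =====

lemma pvDigitSum_pos (n : Nat) (h : 0 < n) :
    pvDigitSum n = ((n % 10 : Nat) : Int) + pvDigitSum (n / 10) := by
  cases n with
  | zero => omega
  | succ m => rw [pvDigitSum]

lemma pvCharDigit_digitChar (m : Nat) (h : m < 10) :
    pvCharDigit (Nat.digitChar m) = (m : Int) := by
  interval_cases m <;> decide

lemma toDigitsCore_digit_sum (fuel : Nat) : ∀ (n : Nat) (ds : List Char), n < fuel →
    ((Nat.toDigitsCore 10 fuel n ds).map pvCharDigit).sum
      = pvDigitSum n + (ds.map pvCharDigit).sum := by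
  induction fuel with
  | zero => intro n ds h; omega
  | succ f ih =>
    intro n ds h
    rw [Nat.toDigitsCore]
    by_cases h0 : n = 0
    · subst h0
      simp [pvCharDigit_digitChar, pvDigitSum]
    · have hpos : 0 < n := Nat.pos_of_ne_zero h0
      rw [pvDigitSum_pos n hpos]
      by_cases hq : n / 10 = 0
      · simp only [hq, if_pos]
        simp [pvCharDigit_digitChar (n % 10) (Nat.mod_lt n (by omega)), pvDigitSum]
      · simp only [hq, ite_false]
        rw [ih (n / 10) _ (by omega)]
        simp [pvCharDigit_digitChar (n % 10) (Nat.mod_lt n (by omega))]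
        ring

lemma toChars_digit_sum (n : Int) (h : 0 ≤ n) :
    ((PySem.Int.toChars n).map pvCharDigit).sum = pvDigitSum n.toNat := by
  rw [PySem.Int.toChars, if_neg (by omega)]
  rw [Nat.toDigits, toDigitsCore_digit_sum (n.toNat + 1) n.toNat [] (by omega)]
  simp

lemma foldA_eq (nums : List Int) : ∀ (a : Int),
    nums.foldl (fun acc ele =>
      if 10 ≤ ele then acc + ((PySem.Int.toChars ele).map pvCharDigit).sum
      else acc + ele) a
    = a + (nums.map (fun e =>
        if 10 ≤ e then ((PySem.Int.toChars e).map pvCharDigit).sum else e)).sum := by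
  induction nums with
  | nil => intro a; simp
  | cons x xs ih =>
    intro a
    simp only [List.foldl, List.map, List.sum_cons]
    rw [ih]
    split_ifs <;> ring

lemma foldB_eq (nums : List Int) : ∀ (b : Int),
    nums.foldl (fun diff ele =>
      if 10 ≤ ele then diff + ele - pvDigitSum ele.toNat else diff) b
    = b + (nums.map (fun e =>
        if 10 ≤ e then e - pvDigitSum e.toNat else 0)).sum := by
  induction nums with
  | nil => intro b; simp
  | cons x xs ih =>
    intro b
    simp only [List.foldl, List.map, List.sum_cons]
    rw [ih]
    split_ifs <;> ring

lemma sum_sub_digit_sums (nums : List Int) :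
    nums.sum - (nums.map (fun e =>
        if 10 ≤ e then ((PySem.Int.toChars e).map pvCharDigit).sum else e)).sum
    = (nums.map (fun e => if 10 ≤ e then e - pvDigitSum e.toNat else 0)).sum := by
  induction nums with
  | nil => simp
  | cons x xs ih =>
    simp only [List.map, List.sum_cons]
    rw [← ih]
    by_cases hx : 10 ≤ x
    · rw [if_pos hx, if_pos hx, toChars_digit_sum x (by omega)]
      ring
    · rw [if_neg hx, if_neg hx]
      ring

-- ===== VERDICT (by name: the statement is the Claim_ definition above) =====
theorem magitude_of_ele_sum_and_digit_sum_spec : Claim_equal_magitude_of_ele_sum_and_digit_sum := by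
  intro nums _
  unfold Spec_magitude_of_ele_sum_and_digit_sum magitude_of_ele_sum_and_digit_sum
    magitude_of_ele_sum_and_digit_sum_alt
  simp only [foldA_eq, foldB_eq, zero_add]
  rw [sum_sub_digit_sums]
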